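-- pv_equiv track=rewrite | github.com/kiung22/algorithm-problem-solving | Programmers/skill3/solution2.py | solution
-- ===== SOURCE A (Python) =====
-- from collections import deque
--
-- def solution(n, results):
--     indegree = [0] * (n+1)
--     win = [[] for _ in range(n+1)]
--
--     for u, v in results:
--        win[u].append(v)
--        indegree[v] += 1
--
--     queue = deque()
--     for i in range(1, n+1):
--         if indegree[i] == 0:
--             queue.append(i)
--
--     answer = 0
--     while queue:
--         if len(queue) == 1:
--             answer += 1
--
--         queue2 = deque()
--         while queue:
--             u = queue.popleft()
--
--             for v in win[u]:
--                 indegree[v] -= 1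
--
--                 if indegree[v] == 0:
--                     queue2.append(v)
--         queue = queue2
--
--     return answer
-- ===== SOURCE B (Python) =====
-- from collections import deque
--
-- def solution(n, results):
--     indeg = [0] * (n + 1)
--     succ = [[] for _ in range(n + 1)]
--     for u, v in results:
--         succ[u].append(v)
--         indeg[v] += 1
--
--     level = [0] * (n + 1)
--     sizes = {}
--     queue = deque(i for i in range(1, n + 1) if indeg[i] == 0)
--     while queue:
--         u = queue.popleft()
--         sizes[level[u]] = sizes.get(level[u], 0) + 1
--         for v in succ[u]:
--             indeg[v] -= 1
--             if indeg[v] == 0: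
--                 level[v] = level[u] + 1
--                 queue.append(v)
--
--     return sum(1 for c in sizes.values() if c == 1)
-- ===== Notes on version B (the rewrite author's own statement) =====
-- stated objective: alternative
-- what changed: Replaces counting singleton BFS layers during a two-deque layered traversal (round loop, len(queue)==1 test per round) by a single flat Kahn queue that assigns each scheduled node its level (sources level 0, level[v]=level[u]+1 when v's indegree drains), tallies per-level sizes in a dict during the one pass, and returns the number of levels whose size is 1; no layer buckets and no per-round length tests. Pre_ excludes exactly the inputs on which both programs raise IndexError (a label outside -(n+1)..n).
import Mathlib
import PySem

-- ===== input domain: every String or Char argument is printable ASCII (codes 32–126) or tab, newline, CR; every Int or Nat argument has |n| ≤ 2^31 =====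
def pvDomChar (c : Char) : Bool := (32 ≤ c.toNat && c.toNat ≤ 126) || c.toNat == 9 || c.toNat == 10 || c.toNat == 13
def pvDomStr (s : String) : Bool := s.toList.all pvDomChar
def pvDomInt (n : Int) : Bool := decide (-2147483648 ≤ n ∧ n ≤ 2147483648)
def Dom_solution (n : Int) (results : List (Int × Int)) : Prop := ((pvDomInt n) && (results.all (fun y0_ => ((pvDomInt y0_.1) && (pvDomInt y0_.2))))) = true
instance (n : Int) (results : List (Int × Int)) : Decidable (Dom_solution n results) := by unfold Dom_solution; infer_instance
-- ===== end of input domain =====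

-- B replaces A's two-deque layered BFS (counting rounds of length 1) by a single flat Kahn
-- queue that assigns each scheduled node a level and tallies per-level sizes in a dict
-- (objective: alternative decomposition, same return value on Pre_).

-- ===== PORT A =====
-- Python xs[i] = x with negative-index wraparound; the out-of-range case (Python IndexError,
-- excluded by Pre_solution) leaves the list unchanged.
def pvSetItem {α : Type} (xs : List α) (i : Int) (x : α) : List α :=
  if 0 ≤ i ∧ i < xs.length then xs.set i.toNat x
  else if 0 ≤ i + xs.length ∧ i < 0 then xs.set (i + xs.length).toNat x
  else xs

-- 'indegree[v] -= 1; if indegree[v] == 0: queue2.append(v)'  (state = (indegree, queue2))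
def pvStepV (s : List Int × List Int) (v : Int) : List Int × List Int :=
  let d := PySem.List.pyGetD s.1 v 0 - 1
  (pvSetItem s.1 v d, if d = 0 then s.2 ++ [v] else s.2)

-- body of 'while queue: u = queue.popleft(); for v in win[u]: …'
def pvStepU (win : List (List Int)) (s : List Int × List Int) (u : Int) : List Int × List Int :=
  (PySem.List.pyGetD win u []).foldl pvStepV s

-- 'while queue:' outer loop; fuel n + len(results) + 1 suffices on Pre_solution: every executed
-- round pops at least one entry, and total queue entries are bounded by the initial queue (≤ n)
-- plus the total indegree (≤ len(results)); a truncated trailing empty round returns ans unchanged.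
def pvLoopA (win : List (List Int)) : Nat → List Int → List Int → Int → Int
  | 0, _, _, ans => ans
  | fuel+1, indeg, queue, ans =>
    if queue.isEmpty then ans
    else
      let ans' := if queue.length = 1 then ans + 1 else ans
      let s := queue.foldl (pvStepU win) (indeg, [])
      pvLoopA win fuel s.1 s.2 ans'

def solution (n : Int) (results : List (Int × Int)) : Int :=
  let indegree0 : List Int := List.replicate (n+1).toNat 0
  let win0 : List (List Int) := List.replicate (n+1).toNat []
  let built := results.foldl (fun (s : List (List Int) × List Int) p =>
      (pvSetItem s.1 p.1 (PySem.List.pyGetD s.1 p.1 [] ++ [p.2]),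
       pvSetItem s.2 p.2 (PySem.List.pyGetD s.2 p.2 0 + 1))) (win0, indegree0)
  let queue := (PySem.List.pyRange 1 (n+1) 1).foldl
      (fun q i => if PySem.List.pyGetD built.2 i 0 = 0 then q ++ [i] else q) ([] : List Int)
  pvLoopA built.1 (n.toNat + results.length + 1) built.2 queue 0

-- ===== PORT B =====
-- body of 'for v in succ[u]: indeg[v] -= 1; if indeg[v] == 0: level[v] = level[u] + 1; queue.append(v)'
-- (state = (indeg, level, queue))
def pvStepB (u : Int) (s : List Int × List Int × List Int) (v : Int) :
    List Int × List Int × List Int :=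
  let d := PySem.List.pyGetD s.1 v 0 - 1
  if d = 0 then
    (pvSetItem s.1 v d,
     pvSetItem s.2.1 v (PySem.List.pyGetD s.2.1 u 0 + 1),
     s.2.2 ++ [v])
  else
    (pvSetItem s.1 v d, s.2.1, s.2.2)

-- 'while queue: u = queue.popleft(); sizes[level[u]] = sizes.get(level[u], 0) + 1; for v in succ[u]: …'
-- fuel n + len(results) + 1 suffices on Pre_solution: one pop per iteration, and total queue
-- entries are bounded by the initial queue (≤ n) plus the total indegree (≤ len(results)).
def pvLoopB (succ : List (List Int)) :
    Nat → List Int → List Int → List Int → PySem.Dict Int Int → PySem.Dict Int Int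
  | 0, _, _, _, sizes => sizes
  | _+1, _, _, [], sizes => sizes
  | fuel+1, indeg, level, u :: rest, sizes =>
    let s' := (PySem.List.pyGetD succ u []).foldl (pvStepB u) (indeg, level, rest)
    pvLoopB succ fuel s'.1 s'.2.1 s'.2.2
      (sizes.modify (PySem.List.pyGetD level u 0) 0 (· + 1))

def solution_alt (n : Int) (results : List (Int × Int)) : Int :=
  let indeg0 : List Int := List.replicate (n+1).toNat 0
  let succ0 : List (List Int) := List.replicate (n+1).toNat []
  let built := results.foldl (fun (s : List (List Int) × List Int) p =>
      (pvSetItem s.1 p.1 (PySem.List.pyGetD s.1 p.1 [] ++ [p.2]),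
       pvSetItem s.2 p.2 (PySem.List.pyGetD s.2 p.2 0 + 1))) (succ0, indeg0)
  let level0 : List Int := List.replicate (n+1).toNat 0
  let queue0 := (PySem.List.pyRange 1 (n+1) 1).foldl
      (fun q i => if PySem.List.pyGetD built.2 i 0 = 0 then q ++ [i] else q) ([] : List Int)
  let sizes := pvLoopB built.1 (n.toNat + results.length + 1) built.2 level0 queue0 PySem.Dict.empty
  sizes.values.foldl (fun a c => if c = 1 then a + 1 else a) 0

-- ===== PRECONDITION & SPEC =====
-- Pre_solution holds exactly when every label fits Python's list indexing of the size-(n+1)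
-- arrays, i.e. -(n+1) ≤ label ≤ n: outside it both A and B raise IndexError.
def Pre_solution (n : Int) (results : List (Int × Int)) : Prop :=
  ∀ p ∈ results, -(n+1) ≤ p.1 ∧ p.1 ≤ n ∧ -(n+1) ≤ p.2 ∧ p.2 ≤ n

instance (n : Int) (results : List (Int × Int)) : Decidable (Pre_solution n results) := by
  unfold Pre_solution; infer_instance

def pvWitness_solution : Int × (List (Int × Int)) := (4, [(1, 2), (2, 3), (1, 3)])

def Spec_solution (n : Int) (results : List (Int × Int)) (out : Int) : Prop := out = solution_alt n results
instance (n : Int) (results : List (Int × Int)) (out : Int) : Decidable (Spec_solution n results out) := by unfold Spec_solution; infer_instance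

-- ===== CLAIM (what is proved, stated in full; the proofs are below) =====
def Claim_equal_solution : Prop := ∀ (n : Int) (results : List (Int × Int)), Dom_solution n results → Pre_solution n results → Spec_solution n results (solution n results)

-- ===== LEMMAS AND PROOFS =====

-- the slot of Python index i in a length-m list (indices are taken modulo sign convention)
def pvNorm (m : Nat) (i : Int) : Int := if 0 ≤ i then i else i + m
-- Python index i is in range for a length-m list
def pvInR (m : Nat) (i : Int) : Prop := -(m : Int) ≤ i ∧ i < (m : Int)
-- sum of the positive parts of an indegree array (the termination potential)
def pvPS (xs : List Int) : Nat := (xs.map Int.toNat).sum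
-- sum(1 for c in vals if c == 1)
def pvTally (vals : List Int) : Int := vals.foldl (fun a c => if c = 1 then a + 1 else a) 0
-- sizes after c pops of the same level key
def pvBumpN (d : PySem.Dict Int Int) (k : Int) : Nat → PySem.Dict Int Int
  | 0 => d
  | c+1 => (pvBumpN d k c).modify k 0 (· + 1)

lemma pvNorm_bounds {m : Nat} {i : Int} (h : pvInR m i) :
    0 ≤ pvNorm m i ∧ pvNorm m i < m := by
  unfold pvInR at h
  unfold pvNorm
  split <;> omega

lemma pvGet_norm {α : Type} (xs : List α) (i : Int) (d : α) (h : pvInR xs.length i) :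
    PySem.List.pyGetD xs i d = xs.getD (pvNorm xs.length i).toNat d := by
  obtain ⟨hn0, hn1⟩ := pvNorm_bounds h
  have hI := h
  unfold pvInR at hI
  obtain ⟨hI0, hI1⟩ := hI
  by_cases h0 : 0 ≤ i
  · rw [PySem.List.pyGetD_eq_getElem xs d h0 (by exact_mod_cast hI1)]
    rw [List.getD_eq_getElem _ _ (by omega)]
    congr 1
    unfold pvNorm
    rw [if_pos h0]
  · have he : PySem.List.pyGetD xs i d = xs[xs.length - (-i).toNat]'(by omega) := by
      have hcast : -(((-i).toNat : Nat) : Int) = i := by omega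
      have := PySem.List.pyGetD_neg_natCast xs (-i).toNat d (by omega) (by omega)
      rw [hcast] at this
      exact this
    rw [he, List.getD_eq_getElem _ _ (by omega)]
    congr 1
    unfold pvNorm at hn0 hn1 ⊢
    rw [if_neg h0] at hn0 hn1 ⊢
    omega

lemma pvSet_norm {α : Type} (xs : List α) (i : Int) (x : α) (h : pvInR xs.length i) :
    pvSetItem xs i x = xs.set (pvNorm xs.length i).toNat x := by
  unfold pvInR at h
  unfold pvSetItem pvNorm
  by_cases h0 : 0 ≤ i
  · rw [if_pos ⟨h0, h.2⟩, if_pos h0]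
  · rw [if_neg (by omega), if_pos ⟨by omega, by omega⟩, if_neg h0]

lemma length_pvSetItem {α : Type} (xs : List α) (i : Int) (x : α) :
    (pvSetItem xs i x).length = xs.length := by
  unfold pvSetItem; split_ifs <;> simp

lemma pvGetSet {α : Type} (xs : List α) (i j : Int) (x d : α)
    (hi : pvInR xs.length i) (hj : pvInR xs.length j) :
    PySem.List.pyGetD (pvSetItem xs i x) j d
      = if pvNorm xs.length j = pvNorm xs.length i then x else PySem.List.pyGetD xs j d := by
  have hlen : (pvSetItem xs i x).length = xs.length := length_pvSetItem xs i x
  rw [pvGet_norm _ _ _ (by rw [hlen]; exact hj), hlen, pvSet_norm _ _ _ hi,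
      pvGet_norm _ _ _ hj]
  obtain ⟨hi0, hi1⟩ := pvNorm_bounds hi
  obtain ⟨hj0, hj1⟩ := pvNorm_bounds hj
  rw [List.getD_eq_getElem _ _ (by simp; omega), List.getD_eq_getElem _ _ (by omega),
      List.getElem_set]
  by_cases hedge : pvNorm xs.length j = pvNorm xs.length i
  · rw [if_pos (by omega), if_pos hedge]
  · rw [if_neg (by omega), if_neg hedge]

lemma pvGet_congr {α : Type} (xs : List α) (i j : Int) (d : α)
    (hi : pvInR xs.length i) (hj : pvInR xs.length j)
    (h : pvNorm xs.length i = pvNorm xs.length j) :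
    PySem.List.pyGetD xs i d = PySem.List.pyGetD xs j d := by
  rw [pvGet_norm _ _ _ hi, pvGet_norm _ _ _ hj, h]

lemma pvGet_replicate {α : Type} (m : Nat) (c : α) (i : Int) (d : α) (h : pvInR m i) :
    PySem.List.pyGetD (List.replicate m c) i d = c := by
  rw [pvGet_norm _ _ _ (by simpa using h)]
  obtain ⟨h0, h1⟩ := pvNorm_bounds h
  rw [List.getD_eq_getElem _ _ (by simp; omega)]
  simp

lemma pvSumSet (l : List Nat) (k : Nat) (a : Nat) (h : k < l.length) :
    (l.set k a).sum + l.getD k 0 = l.sum + a := by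
  induction l generalizing k with
  | nil => simp at h
  | cons x xs ih =>
    cases k with
    | zero => simp [List.getD]; omega
    | succ k =>
      simp only [List.set_cons_succ, List.sum_cons, List.getD_cons_succ]
      have := ih k (by simpa using h)
      omega

lemma pvPS_set (xs : List Int) (k : Nat) (y : Int) (h : k < xs.length) :
    pvPS (xs.set k y) + (xs.getD k 0).toNat = pvPS xs + y.toNat := by
  unfold pvPS
  rw [List.map_set]
  have h1 : (xs.map Int.toNat).getD k 0 = (xs.getD k 0).toNat := by
    rw [List.getD_eq_getElem _ _ (by simpa using h), List.getD_eq_getElem _ _ h]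
    simp
  rw [← h1]
  exact pvSumSet (xs.map Int.toNat) k y.toNat (by simpa using h)

-- value read / written by one decrement event, in slot form
lemma pvSetItem_getD_PS (i : List Int) (e : Int) (he : pvInR i.length e) (y : Int) :
    pvPS (pvSetItem i e y) + (PySem.List.pyGetD i e 0).toNat = pvPS i + y.toNat := by
  rw [pvSet_norm _ _ _ he, pvGet_norm _ _ _ he]
  obtain ⟨h0, h1⟩ := pvNorm_bounds he
  exact pvPS_set i (pvNorm i.length e).toNat y (by omega)

lemma pvTally_append (vals : List Int) (c : Int) :
    pvTally (vals ++ [c]) = pvTally vals + (if c = 1 then 1 else 0) := by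
  unfold pvTally
  rw [List.foldl_append]
  simp only [List.foldl_cons, List.foldl_nil]
  split <;> ring

lemma pvBumpN_items (d : PySem.Dict Int Int) (k : Int)
    (hk : k ∉ d.keys) (hnd : d.keys.Nodup) :
    ∀ c : Nat, 1 ≤ c → (pvBumpN d k c).items = d.items ++ [(k, (c : Int))] := by
  intro c
  induction c with
  | zero => omega
  | succ c ih =>
    intro _
    by_cases hc : 1 ≤ c
    · have hitems := ih hc
      show ((pvBumpN d k c).modify k 0 (· + 1)).items = _
      have hmod : (pvBumpN d k c).modify k 0 (· + 1)
          = (pvBumpN d k c).insert k ((pvBumpN d k c).getD k 0 + 1) := rfl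
      have hkeys : (pvBumpN d k c).keys = d.keys ++ [k] := by
        show (pvBumpN d k c).items.map (·.1) = _
        rw [hitems, List.map_append]
        rfl
      have hknd : (pvBumpN d k c).keys.Nodup := by
        rw [hkeys]
        refine List.Nodup.append hnd (List.nodup_singleton k) ?_
        intro a ha hb
        simp only [List.mem_singleton] at hb
        exact hk (hb ▸ ha)
      have hgd : (pvBumpN d k c).getD k 0 = (c : Int) := by
        apply PySem.Dict.getD_of_mem_items _ ?_ hknd
        rw [hitems]
        simp
      have hcont : (pvBumpN d k c).contains k = true := by
        rw [PySem.Dict.contains_iff_mem_keys, hkeys]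
        simp
      rw [hmod, hgd, PySem.Dict.items_insert_of_contains _ _ hcont, hitems,
          List.map_append]
      have h1 : List.map (fun p => if (p.1 == k) = true then (k, (c : Int) + 1) else p) d.items
          = d.items := by
        have hcg := List.map_congr_left (l := d.items)
          (f := fun p : Int × Int => if (p.1 == k) = true then (k, (c : Int) + 1) else p)
          (g := id) (by
            intro p hp
            have hpk : p.1 ≠ k := by
              intro hpk
              exact hk (hpk ▸ List.mem_map.mpr ⟨p, hp, rfl⟩)
            simp [hpk])
        rw [hcg, List.map_id]
      rw [h1]
      congr 1
      have hcast : ((c : Int) + 1) = (((c + 1 : Nat)) : Int) := by push_cast; ring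
      rw [List.map_cons, List.map_nil, if_pos (by simp), hcast]
    · have hc0 : c = 0 := by omega
      subst hc0
      show (d.modify k 0 (· + 1)).items = _
      have hmod : d.modify k 0 (· + 1) = d.insert k (d.getD k 0 + 1) := rfl
      have hcont : d.contains k = false := by
        rw [Bool.eq_false_iff]
        intro hc
        exact hk ((PySem.Dict.contains_iff_mem_keys d k).mp hc)
      rw [hmod, PySem.Dict.getD_of_not_contains _ _ hcont,
          PySem.Dict.items_insert_of_not_contains _ _ hcont]
      norm_num

lemma pvBumpN_shift (d : PySem.Dict Int Int) (k : Int) (c : Nat) :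
    pvBumpN (d.modify k 0 (· + 1)) k c = pvBumpN d k (c + 1) := by
  induction c with
  | zero => rfl
  | succ c ih =>
    show (pvBumpN (d.modify k 0 (· + 1)) k c).modify k 0 (· + 1) = _
    rw [ih]
    rfl

-- the joint conclusion of one round's edge-event fold: B's state projects to A's, the
-- level/indegree facts survive, and the potential does not increase
def pvEF (m : Nat) (u r : Int) (rest : List Int) (phi : Nat)
    (A : List Int × List Int) (B : List Int × List Int × List Int) : Prop :=
  B.1 = A.1 ∧ B.2.2 = rest ++ A.2 ∧
  A.1.length = m ∧ B.2.1.length = m ∧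
  PySem.List.pyGetD A.1 u 0 ≤ 0 ∧ PySem.List.pyGetD B.2.1 u 0 = r ∧
  (∀ x ∈ rest, PySem.List.pyGetD A.1 x 0 ≤ 0 ∧ PySem.List.pyGetD B.2.1 x 0 = r) ∧
  (∀ x ∈ A.2, pvInR m x ∧ PySem.List.pyGetD A.1 x 0 ≤ 0 ∧ PySem.List.pyGetD B.2.1 x 0 = r + 1) ∧
  pvPS A.1 + A.2.length ≤ phi

lemma pvEdgeFold (m : Nat) (u r : Int) (hu : pvInR m u) (rest : List Int)
    (hrestR : ∀ x ∈ rest, pvInR m x) :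
    ∀ (es : List Int) (i lv : List Int) (q2 : List Int),
    i.length = m → lv.length = m →
    (∀ v ∈ es, pvInR m v) →
    PySem.List.pyGetD i u 0 ≤ 0 → PySem.List.pyGetD lv u 0 = r →
    (∀ x ∈ rest, PySem.List.pyGetD i x 0 ≤ 0 ∧ PySem.List.pyGetD lv x 0 = r) →
    (∀ x ∈ q2, pvInR m x ∧ PySem.List.pyGetD i x 0 ≤ 0 ∧ PySem.List.pyGetD lv x 0 = r + 1) →
    pvEF m u r rest (pvPS i + q2.length)
      (es.foldl pvStepV (i, q2)) (es.foldl (pvStepB u) (i, lv, rest ++ q2)) := by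
  intro es
  induction es with
  | nil =>
    intro i lv q2 hil hll _ hiu hlu hrest hq2
    exact ⟨rfl, rfl, hil, hll, hiu, hlu,
      fun x hx => hrest x hx, fun x hx => hq2 x hx, le_refl _⟩
  | cons e es ih =>
    intro i lv q2 hil hll hes hiu hlu hrest hq2
    have heR : pvInR m e := hes e List.mem_cons_self
    have heR' : pvInR i.length e := by rw [hil]; exact heR
    have huI : pvInR i.length u := by rw [hil]; exact hu
    have huL : pvInR lv.length u := by rw [hll]; exact hu
    have heL : pvInR lv.length e := by rw [hll]; exact heR
    set old := PySem.List.pyGetD i e 0 with holddef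
    set d := old - 1 with hddef
    set i1 := pvSetItem i e d with hi1def
    have hi1len : i1.length = m := by rw [hi1def, length_pvSetItem, hil]
    have hgetset : ∀ x : Int, pvInR m x →
        PySem.List.pyGetD i1 x 0
          = if pvNorm m x = pvNorm m e then d else PySem.List.pyGetD i x 0 := by
      intro x hx
      rw [hi1def, pvGetSet i e x d 0 heR' (by rw [hil]; exact hx), hil]
    have hstepA : pvStepV (i, q2) e = (i1, if d = 0 then q2 ++ [e] else q2) := rfl
    have hiu1 : PySem.List.pyGetD i1 u 0 ≤ 0 := by
      rw [hgetset u hu]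
      by_cases hne : pvNorm m u = pvNorm m e
      · have : PySem.List.pyGetD i u 0 = old := by
          rw [holddef]
          exact pvGet_congr i u e 0 huI heR' (by rw [hil]; exact hne)
        rw [if_pos hne]
        omega
      · rw [if_neg hne]
        exact hiu
    have hirest1 : ∀ x ∈ rest, PySem.List.pyGetD i1 x 0 ≤ 0 := by
      intro x hx
      rw [hgetset x (hrestR x hx)]
      by_cases hne : pvNorm m x = pvNorm m e
      · have : PySem.List.pyGetD i x 0 = old := by
          rw [holddef]
          exact pvGet_congr i x e 0 (by rw [hil]; exact hrestR x hx) heR' (by rw [hil]; exact hne)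
        rw [if_pos hne]
        have := (hrest x hx).1
        omega
      · rw [if_neg hne]
        exact (hrest x hx).1
    have hiq21 : ∀ x ∈ q2, PySem.List.pyGetD i1 x 0 ≤ 0 := by
      intro x hx
      rw [hgetset x (hq2 x hx).1]
      by_cases hne : pvNorm m x = pvNorm m e
      · have : PySem.List.pyGetD i x 0 = old := by
          rw [holddef]
          exact pvGet_congr i x e 0 (by rw [hil]; exact (hq2 x hx).1) heR' (by rw [hil]; exact hne)
        rw [if_pos hne]
        have := (hq2 x hx).2.1
        omega
      · rw [if_neg hne]
        exact (hq2 x hx).2.1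
    have hPSstep : pvPS i1 + old.toNat = pvPS i + d.toNat := by
      rw [hi1def]
      exact pvSetItem_getD_PS i e heR' d
    by_cases hd : d = 0
    · -- enqueue: old = 1, a slot distinct from every tracked one; level[e] := r + 1
      have hold1 : old = 1 := by omega
      set lv1 := pvSetItem lv e (PySem.List.pyGetD lv u 0 + 1) with hlv1def
      have hlv1len : lv1.length = m := by rw [hlv1def, length_pvSetItem, hll]
      have hstepB : pvStepB u (i, lv, rest ++ q2) e = (i1, lv1, (rest ++ q2) ++ [e]) := by
        show (if d = 0 then _ else _) = _
        rw [if_pos hd]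
      have hlvset : ∀ x : Int, pvInR m x →
          PySem.List.pyGetD lv1 x 0
            = if pvNorm m x = pvNorm m e then PySem.List.pyGetD lv u 0 + 1
              else PySem.List.pyGetD lv x 0 := by
        intro x hx
        rw [hlv1def, pvGetSet lv e x _ 0 heL (by rw [hll]; exact hx), hll]
      have hfresh : ∀ x : Int, pvInR m x → PySem.List.pyGetD i x 0 ≤ 0 →
          pvNorm m x ≠ pvNorm m e := by
        intro x hx hle hne
        have : PySem.List.pyGetD i x 0 = old := by
          rw [holddef]
          exact pvGet_congr i x e 0 (by rw [hil]; exact hx) heR' (by rw [hil]; exact hne)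
        omega
      have hlvu1 : PySem.List.pyGetD lv1 u 0 = r := by
        rw [hlvset u hu, if_neg (hfresh u hu hiu), hlu]
      have hlvrest1 : ∀ x ∈ rest, PySem.List.pyGetD lv1 x 0 = r := by
        intro x hx
        rw [hlvset x (hrestR x hx), if_neg (hfresh x (hrestR x hx) (hrest x hx).1),
            (hrest x hx).2]
      have hq2' : ∀ x ∈ q2 ++ [e], pvInR m x ∧ PySem.List.pyGetD i1 x 0 ≤ 0 ∧
          PySem.List.pyGetD lv1 x 0 = r + 1 := by
        intro x hx
        rcases List.mem_append.mp hx with hx | hx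
        · refine ⟨(hq2 x hx).1, hiq21 x hx, ?_⟩
          rw [hlvset x (hq2 x hx).1, if_neg (hfresh x (hq2 x hx).1 (hq2 x hx).2.1),
              (hq2 x hx).2.2]
        · have hxe : x = e := by simpa using hx
          subst hxe
          refine ⟨heR, ?_, ?_⟩
          · rw [hgetset x heR, if_pos rfl]
            omega
          · rw [hlvset x heR, if_pos rfl, hlu]
      have ihres := ih i1 lv1 (q2 ++ [e]) hi1len hlv1len
        (fun v hv => hes v (List.mem_cons_of_mem _ hv)) hiu1 hlvu1
        (fun x hx => ⟨hirest1 x hx, hlvrest1 x hx⟩) hq2'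
      rw [List.foldl_cons, List.foldl_cons, hstepA, hstepB, if_pos hd, List.append_assoc]
      refine ⟨ihres.1, ihres.2.1, ihres.2.2.1, ihres.2.2.2.1, ihres.2.2.2.2.1,
        ihres.2.2.2.2.2.1, ihres.2.2.2.2.2.2.1, ihres.2.2.2.2.2.2.2.1, ?_⟩
      have hbound := ihres.2.2.2.2.2.2.2.2
      have : pvPS i1 + (q2 ++ [e]).length ≤ pvPS i + q2.length := by
        simp only [List.length_append, List.length_cons, List.length_nil]
        omega
      omega
    · -- plain decrement: queue and level unchanged
      have hstepB : pvStepB u (i, lv, rest ++ q2) e = (i1, lv, rest ++ q2) := by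
        show (if d = 0 then _ else _) = _
        rw [if_neg hd]
      have ihres := ih i1 lv q2 hi1len hll
        (fun v hv => hes v (List.mem_cons_of_mem _ hv)) hiu1 hlu
        (fun x hx => ⟨hirest1 x hx, (hrest x hx).2⟩)
        (fun x hx => ⟨(hq2 x hx).1, hiq21 x hx, (hq2 x hx).2.2⟩)
      rw [List.foldl_cons, List.foldl_cons, hstepA, hstepB, if_neg hd]
      refine ⟨ihres.1, ihres.2.1, ihres.2.2.1, ihres.2.2.2.1, ihres.2.2.2.2.1,
        ihres.2.2.2.2.2.1, ihres.2.2.2.2.2.2.1, ihres.2.2.2.2.2.2.2.1, ?_⟩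
      have hbound := ihres.2.2.2.2.2.2.2.2
      have : pvPS i1 ≤ pvPS i := by omega
      omega

-- one whole round: B pops every member of Q (bumping the level-r size once per pop) and
-- ends at A's end-of-round state
lemma pvRound (m : Nat) (win : List (List Int)) (r : Int)
    (hwin : ∀ u, pvInR m u → ∀ v ∈ PySem.List.pyGetD win u [], pvInR m v) :
    ∀ (Q : List Int) (fuel : Nat) (i lv q2 : List Int) (sizes : PySem.Dict Int Int),
    i.length = m → lv.length = m →
    (∀ x ∈ Q, pvInR m x ∧ PySem.List.pyGetD i x 0 ≤ 0 ∧ PySem.List.pyGetD lv x 0 = r) →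
    (∀ x ∈ q2, pvInR m x ∧ PySem.List.pyGetD i x 0 ≤ 0 ∧ PySem.List.pyGetD lv x 0 = r + 1) →
    ∃ lv' : List Int,
      pvLoopB win (fuel + Q.length) i lv (Q ++ q2) sizes
        = pvLoopB win fuel (Q.foldl (pvStepU win) (i, q2)).1 lv'
            (Q.foldl (pvStepU win) (i, q2)).2 (pvBumpN sizes r Q.length) ∧
      (Q.foldl (pvStepU win) (i, q2)).1.length = m ∧ lv'.length = m ∧
      (∀ x ∈ (Q.foldl (pvStepU win) (i, q2)).2, pvInR m x ∧
        PySem.List.pyGetD (Q.foldl (pvStepU win) (i, q2)).1 x 0 ≤ 0 ∧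
        PySem.List.pyGetD lv' x 0 = r + 1) ∧
      pvPS (Q.foldl (pvStepU win) (i, q2)).1 + (Q.foldl (pvStepU win) (i, q2)).2.length
        ≤ pvPS i + q2.length := by
  intro Q
  induction Q with
  | nil =>
    intro fuel i lv q2 sizes hil hll _ hq2
    exact ⟨lv, rfl, hil, hll, hq2, le_refl _⟩
  | cons u Q' ihQ =>
    intro fuel i lv q2 sizes hil hll hQ hq2
    obtain ⟨huR, hiu, hlu⟩ := hQ u List.mem_cons_self
    have hrestR : ∀ x ∈ Q', pvInR m x := fun x hx => (hQ x (List.mem_cons_of_mem _ hx)).1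
    have hEF := pvEdgeFold m u r huR Q' hrestR (PySem.List.pyGetD win u []) i lv q2
      hil hll (hwin u huR) hiu hlu
      (fun x hx => ⟨(hQ x (List.mem_cons_of_mem _ hx)).2.1, (hQ x (List.mem_cons_of_mem _ hx)).2.2⟩)
      hq2
    set B := (PySem.List.pyGetD win u []).foldl (pvStepB u) (i, lv, Q' ++ q2) with hBdef
    set A1 := (PySem.List.pyGetD win u []).foldl pvStepV (i, q2) with hA1def
    obtain ⟨hB1, hB2, hA1len, hBlen, hAu, hBu, hArest, hAq2, hphi⟩ := hEF
    have hstep : pvLoopB win (fuel + (u :: Q').length) i lv ((u :: Q') ++ q2) sizes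
        = pvLoopB win (fuel + Q'.length) B.1 B.2.1 B.2.2
            (sizes.modify (PySem.List.pyGetD lv u 0) 0 (· + 1)) := by
      have : fuel + (u :: Q').length = (fuel + Q'.length) + 1 := by simp; omega
      rw [this]
      rfl
    have hfoldA : (u :: Q').foldl (pvStepU win) (i, q2) = Q'.foldl (pvStepU win) A1 := by
      rw [List.foldl_cons]
      rfl
    have hA1pair : A1 = (A1.1, A1.2) := rfl
    obtain ⟨lv', hrec, hlen1, hlen2, hinv, hphi2⟩ := ihQ fuel A1.1 B.2.1 A1.2
      (sizes.modify r 0 (· + 1)) hA1len hBlen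
      (fun x hx => ⟨hrestR x hx, (hArest x hx).1, (hArest x hx).2⟩) hAq2
    refine ⟨lv', ?_, ?_, hlen2, ?_, ?_⟩
    · rw [hstep, hlu, hB1, hB2, hrec, hfoldA, hA1pair]
      have hbl : (u :: Q').length = Q'.length + 1 := rfl
      rw [hbl, ← pvBumpN_shift]
    · rw [hfoldA, hA1pair]
      exact hlen1
    · rw [hfoldA, hA1pair]
      exact hinv
    · rw [hfoldA, hA1pair]
      calc pvPS (Q'.foldl (pvStepU win) (A1.1, A1.2)).1
            + (Q'.foldl (pvStepU win) (A1.1, A1.2)).2.length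
          ≤ pvPS A1.1 + A1.2.length := hphi2
        _ ≤ pvPS i + q2.length := hphi

-- the two loops agree from any synchronized round boundary
lemma pvSyncLoops (m : Nat) (win : List (List Int))
    (hwin : ∀ u, pvInR m u → ∀ v ∈ PySem.List.pyGetD win u [], pvInR m v) :
    ∀ (fuelA : Nat) (fuelB : Nat) (i lv Q : List Int) (sizes : PySem.Dict Int Int)
      (ans : Int) (r : Int),
    i.length = m → lv.length = m →
    (∀ x ∈ Q, pvInR m x ∧ PySem.List.pyGetD i x 0 ≤ 0 ∧ PySem.List.pyGetD lv x 0 = r) →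
    (∀ k ∈ sizes.keys, k < r) → sizes.keys.Nodup →
    ans = pvTally sizes.values →
    pvPS i + Q.length ≤ fuelA → pvPS i + Q.length ≤ fuelB →
    pvLoopA win fuelA i Q ans = pvTally (pvLoopB win fuelB i lv Q sizes).values := by
  intro fuelA
  induction fuelA with
  | zero =>
    intro fuelB i lv Q sizes ans r _ _ _ _ _ hans hA _
    have hQnil : Q = [] := by
      have : Q.length = 0 := by omega
      exact List.eq_nil_of_length_eq_zero this
    subst hQnil
    show ans = _
    cases fuelB with
    | zero => exact hans
    | succ fuelB => exact hans
  | succ fuelA ih =>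
    intro fuelB i lv Q sizes ans r hil hll hQ hkeys hknd hans hA hB
    cases hQc : Q with
    | nil =>
      subst hQc
      show (if ([] : List Int).isEmpty then ans else _) = _
      rw [if_pos (by simp)]
      cases fuelB with
      | zero => exact hans
      | succ fuelB => exact hans
    | cons u Q' =>
      subst hQc
      have hQlen : 1 ≤ (u :: Q').length := by simp
      have hfB : fuelB = (fuelB - (u :: Q').length) + (u :: Q').length := by omega
      obtain ⟨lv', hrec, hlen1, hlen2, hinv, hphi⟩ :=
        pvRound m win r hwin (u :: Q') (fuelB - (u :: Q').length) i lv [] sizes hil hll hQ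
          (by intro x hx; simp at hx)
      have hAstep : pvLoopA win (fuelA + 1) i (u :: Q') ans
          = pvLoopA win fuelA ((u :: Q').foldl (pvStepU win) (i, [])).1
              ((u :: Q').foldl (pvStepU win) (i, [])).2
              (if (u :: Q').length = 1 then ans + 1 else ans) := by
        show (if (u :: Q').isEmpty then ans else _) = _
        rw [if_neg (by simp)]
      rw [List.append_nil] at hrec
      rw [hAstep, hfB, hrec]
      · -- apply the induction hypothesis at level r + 1
        have hkeys' : ∀ k ∈ (pvBumpN sizes r (u :: Q').length).keys, k < r + 1 := by
          intro k hk
          have hrk : r ∉ sizes.keys := fun h => absurd (hkeys r h) (by omega)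
          have : (pvBumpN sizes r (u :: Q').length).keys = sizes.keys ++ [r] := by
            show (pvBumpN sizes r (u :: Q').length).items.map (·.1) = _
            rw [pvBumpN_items sizes r hrk hknd _ hQlen, List.map_append]
            rfl
          rw [this] at hk
          rcases List.mem_append.mp hk with h | h
          · have := hkeys k h
            omega
          · simp at h
            omega
        have hknd' : (pvBumpN sizes r (u :: Q').length).keys.Nodup := by
          have hrk : r ∉ sizes.keys := fun h => absurd (hkeys r h) (by omega)
          have : (pvBumpN sizes r (u :: Q').length).keys = sizes.keys ++ [r] := by
            show (pvBumpN sizes r (u :: Q').length).items.map (·.1) = _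
            rw [pvBumpN_items sizes r hrk hknd _ hQlen, List.map_append]
            rfl
          rw [this]
          refine List.Nodup.append hknd (List.nodup_singleton r) ?_
          intro a ha hb
          simp only [List.mem_singleton] at hb
          exact hrk (hb ▸ ha)
        have hans' : (if (u :: Q').length = 1 then ans + 1 else ans)
            = pvTally (pvBumpN sizes r (u :: Q').length).values := by
          have hrk : r ∉ sizes.keys := fun h => absurd (hkeys r h) (by omega)
          have hvals : (pvBumpN sizes r (u :: Q').length).values
              = sizes.values ++ [((u :: Q').length : Int)] := by
            show (pvBumpN sizes r (u :: Q').length).items.map (·.2) = _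
            rw [pvBumpN_items sizes r hrk hknd _ hQlen, List.map_append]
            rfl
          rw [hvals, pvTally_append, ← hans]
          by_cases hone : (u :: Q').length = 1
          · rw [if_pos hone, if_pos (by exact_mod_cast hone)]
          · rw [if_neg hone, if_neg (by
              intro hc
              exact hone (by exact_mod_cast hc))]
            omega
        exact ih (fuelB - (u :: Q').length)
          ((u :: Q').foldl (pvStepU win) (i, [])).1 lv'
          ((u :: Q').foldl (pvStepU win) (i, [])).2
          (pvBumpN sizes r (u :: Q').length)
          (if (u :: Q').length = 1 then ans + 1 else ans) (r + 1)
          hlen1 hlen2 hinv hkeys' hknd' hans'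
          (by
            have h0 : pvPS i + 0 ≤ pvPS i + ([] : List Int).length := by simp
            have := le_trans hphi h0
            simp only [List.length_nil, Nat.add_zero] at this
            omega)
          (by
            have := hphi
            simp only [List.length_nil, Nat.add_zero] at this
            omega)

-- properties of the shared array-building fold: lengths, contents in range, bounded potential
lemma pvBuilt (m : Nat) :
    ∀ (results : List (Int × Int)) (s : List (List Int) × List Int),
    s.1.length = m → s.2.length = m →
    (∀ p ∈ results, pvInR m p.1 ∧ pvInR m p.2) →
    (∀ u, pvInR m u → ∀ v ∈ PySem.List.pyGetD s.1 u [], pvInR m v) →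
    (results.foldl (fun (s : List (List Int) × List Int) p =>
      (pvSetItem s.1 p.1 (PySem.List.pyGetD s.1 p.1 [] ++ [p.2]),
       pvSetItem s.2 p.2 (PySem.List.pyGetD s.2 p.2 0 + 1))) s).1.length = m ∧
    (results.foldl (fun (s : List (List Int) × List Int) p =>
      (pvSetItem s.1 p.1 (PySem.List.pyGetD s.1 p.1 [] ++ [p.2]),
       pvSetItem s.2 p.2 (PySem.List.pyGetD s.2 p.2 0 + 1))) s).2.length = m ∧
    (∀ u, pvInR m u → ∀ v ∈ PySem.List.pyGetD (results.foldl (fun (s : List (List Int) × List Int) p =>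
      (pvSetItem s.1 p.1 (PySem.List.pyGetD s.1 p.1 [] ++ [p.2]),
       pvSetItem s.2 p.2 (PySem.List.pyGetD s.2 p.2 0 + 1))) s).1 u [], pvInR m v) ∧
    pvPS (results.foldl (fun (s : List (List Int) × List Int) p =>
      (pvSetItem s.1 p.1 (PySem.List.pyGetD s.1 p.1 [] ++ [p.2]),
       pvSetItem s.2 p.2 (PySem.List.pyGetD s.2 p.2 0 + 1))) s).2 ≤ pvPS s.2 + results.length := by
  intro results
  induction results with
  | nil =>
    intro s h1 h2 _ hw
    exact ⟨h1, h2, hw, by simp⟩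
  | cons p rs ih =>
    intro s h1 h2 hpre hw
    obtain ⟨hp1, hp2⟩ := hpre p List.mem_cons_self
    have hp1' : pvInR s.1.length p.1 := by rw [h1]; exact hp1
    have hp2' : pvInR s.2.length p.2 := by rw [h2]; exact hp2
    have hl1 : (pvSetItem s.1 p.1 (PySem.List.pyGetD s.1 p.1 [] ++ [p.2])).length = m := by
      rw [length_pvSetItem, h1]
    have hl2 : (pvSetItem s.2 p.2 (PySem.List.pyGetD s.2 p.2 0 + 1)).length = m := by
      rw [length_pvSetItem, h2]
    have hw' : ∀ u, pvInR m u →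
        ∀ v ∈ PySem.List.pyGetD (pvSetItem s.1 p.1 (PySem.List.pyGetD s.1 p.1 [] ++ [p.2])) u [],
          pvInR m v := by
      intro u hu v hv
      rw [pvGetSet s.1 p.1 u _ [] hp1' (by rw [h1]; exact hu), h1] at hv
      by_cases hne : pvNorm m u = pvNorm m p.1
      · rw [if_pos hne] at hv
        rcases List.mem_append.mp hv with hv | hv
        · exact hw p.1 hp1 v hv
        · have : v = p.2 := by simpa using hv
          exact this ▸ hp2
      · rw [if_neg hne] at hv
        exact hw u hu v hv
    have hPS : pvPS (pvSetItem s.2 p.2 (PySem.List.pyGetD s.2 p.2 0 + 1)) ≤ pvPS s.2 + 1 := by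
      have := pvSetItem_getD_PS s.2 p.2 hp2' (PySem.List.pyGetD s.2 p.2 0 + 1)
      have htoNat : (PySem.List.pyGetD s.2 p.2 0 + 1).toNat ≤ (PySem.List.pyGetD s.2 p.2 0).toNat + 1 := by
        omega
      omega
    obtain ⟨ih1, ih2, ih3, ih4⟩ := ih
      (pvSetItem s.1 p.1 (PySem.List.pyGetD s.1 p.1 [] ++ [p.2]),
       pvSetItem s.2 p.2 (PySem.List.pyGetD s.2 p.2 0 + 1))
      hl1 hl2 (fun q hq => hpre q (List.mem_cons_of_mem _ hq)) hw'
    rw [List.foldl_cons]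
    refine ⟨ih1, ih2, ih3, ?_⟩
    calc _ ≤ pvPS (pvSetItem s.2 p.2 (PySem.List.pyGetD s.2 p.2 0 + 1)) + rs.length := ih4
      _ ≤ pvPS s.2 + 1 + rs.length := by omega
      _ = pvPS s.2 + (p :: rs).length := by simp; omega

lemma pvPS_replicate (m : Nat) : pvPS (List.replicate m (0 : Int)) = 0 := by
  unfold pvPS
  rw [List.map_replicate]
  simp

-- ===== VERDICT (by name: the statement is the Claim_ definition above) =====
theorem solution_spec : Claim_equal_solution := by
  intro n results _ hpre
  unfold Pre_solution at hpre
  simp only [Spec_solution, solution, solution_alt]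
  set m := (n+1).toNat with hmdef
  have hpre' : ∀ p ∈ results, pvInR m p.1 ∧ pvInR m p.2 := by
    intro p hp
    have h := hpre p hp
    unfold pvInR
    rw [hmdef]
    omega
  obtain ⟨hb1, hb2, hb3, hb4⟩ := pvBuilt m results
    (List.replicate m ([] : List Int), List.replicate m (0 : Int))
    (by simp) (by simp) hpre'
    (by
      intro u hu v hv
      rw [pvGet_replicate m ([] : List Int) u [] hu] at hv
      simp at hv)
  set built := results.foldl (fun (s : List (List Int) × List Int) p =>
      (pvSetItem s.1 p.1 (PySem.List.pyGetD s.1 p.1 [] ++ [p.2]),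
       pvSetItem s.2 p.2 (PySem.List.pyGetD s.2 p.2 0 + 1)))
      (List.replicate m ([] : List Int), List.replicate m (0 : Int)) with hbdef
  set queue0 := (PySem.List.pyRange 1 (n+1) 1).foldl
      (fun q i => if PySem.List.pyGetD built.2 i 0 = 0 then q ++ [i] else q) ([] : List Int)
    with hqdef
  have hqshape : queue0
      = (PySem.List.pyRange 1 (n+1) 1).filter (fun i => decide (PySem.List.pyGetD built.2 i 0 = 0)) := by
    rw [hqdef, PySem.List.foldl_append_ite_eq_filter (fun i => PySem.List.pyGetD built.2 i 0 = 0),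
        List.nil_append]
  have hq0 : ∀ x ∈ queue0, pvInR m x ∧ PySem.List.pyGetD built.2 x 0 ≤ 0 ∧
      PySem.List.pyGetD (List.replicate m (0 : Int)) x 0 = 0 := by
    intro x hx
    rw [hqshape, List.mem_filter] at hx
    obtain ⟨hxr, hdec⟩ := hx
    rw [PySem.List.mem_pyRange_one] at hxr
    have hxIn : pvInR m x := by
      unfold pvInR
      rw [hmdef]
      omega
    simp only [decide_eq_true_eq] at hdec
    exact ⟨hxIn, by omega, pvGet_replicate m 0 x 0 hxIn⟩
  have hqlen : queue0.length ≤ n.toNat := by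
    rw [hqshape]
    calc ((PySem.List.pyRange 1 (n+1) 1).filter _).length
        ≤ (PySem.List.pyRange 1 (n+1) 1).length := List.length_filter_le _ _
      _ ≤ n.toNat := by
          rw [PySem.List.pyRange_of_pos 1 (n+1) (by norm_num)]
          simp
          split_ifs <;> omega
  have hsync := pvSyncLoops m built.1 hb3
    (n.toNat + results.length + 1) (n.toNat + results.length + 1)
    built.2 (List.replicate m (0 : Int)) queue0 PySem.Dict.empty 0 0
    hb2 (by simp) hq0
    (by intro k hk; rw [PySem.Dict.keys_empty] at hk; simp at hk)
    (by rw [PySem.Dict.keys_empty]; exact List.nodup_nil)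
    (by rfl)
    (by
      have hps : pvPS built.2 ≤ results.length := by simpa [pvPS_replicate] using hb4
      omega)
    (by
      have hps : pvPS built.2 ≤ results.length := by simpa [pvPS_replicate] using hb4
      omega)
  exact hsync
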